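-- pv_equiv track=rewrite | github.com/KitKatDen/WordTegs | main.py | find_tag_in_text
-- ===== SOURCE A (Python) =====
-- def find_tag_in_text(number_of_tags, text, list_of_tags_from_strs):
--     while number_of_tags != 0:
--         start = text.find('{{')  # символы начала тега
--         end = text.find('}}', start)  # символы конца тега
--         if start != -1 and end != -1 and text != '':  # условия, чтобы пустые строки не попали в список
--             list_of_tags_from_strs.append(text[start + 2:end])
--         text = text[end + 2:]
--         # переприсваивание строки, обрезая уже пойманный тег, чтобы ловить несколько тегов в строке,
--         # иначе будет ловиться только первый тег в строке
--         number_of_tags -= 1  # проверка что все теги из строки скопированы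
--     return list_of_tags_from_strs
-- ===== SOURCE B (Python) =====
-- def find_tag_in_text(number_of_tags, text, list_of_tags_from_strs):
--     # One linear character scan with an open-tag buffer, then take the first
--     # number_of_tags collected tags; no repeated find/slice passes.
--     tags = []
--     buf = None
--     i = 0
--     n = len(text)
--     while i < n:
--         if buf is None:
--             if text[i] == '{' and i + 1 < n and text[i + 1] == '{':
--                 buf = []
--                 i += 2
--             else:
--                 i += 1
--         elif text[i] == '}' and i + 1 < n and text[i + 1] == '}':
--             tags.append(''.join(buf))
--             buf = None
--             i += 2
--         else:
--             buf.append(text[i])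
--             i += 1
--     list_of_tags_from_strs.extend(tags[:number_of_tags])
--     return list_of_tags_from_strs
-- ===== Notes on version B (the rewrite author's own statement) =====
-- stated objective: faster
-- what changed: B replaces A's budget-driven loop of repeated str.find calls and whole-string re-slicing per extracted tag by a single linear character scan with an open-tag buffer that collects all tags once, then takes the first number_of_tags of them.
-- outside the precondition, e.g. on find_tag_in_text(-1, '{{a}}', []): A does not finish within the time limit, B returns []
import Mathlib
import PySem

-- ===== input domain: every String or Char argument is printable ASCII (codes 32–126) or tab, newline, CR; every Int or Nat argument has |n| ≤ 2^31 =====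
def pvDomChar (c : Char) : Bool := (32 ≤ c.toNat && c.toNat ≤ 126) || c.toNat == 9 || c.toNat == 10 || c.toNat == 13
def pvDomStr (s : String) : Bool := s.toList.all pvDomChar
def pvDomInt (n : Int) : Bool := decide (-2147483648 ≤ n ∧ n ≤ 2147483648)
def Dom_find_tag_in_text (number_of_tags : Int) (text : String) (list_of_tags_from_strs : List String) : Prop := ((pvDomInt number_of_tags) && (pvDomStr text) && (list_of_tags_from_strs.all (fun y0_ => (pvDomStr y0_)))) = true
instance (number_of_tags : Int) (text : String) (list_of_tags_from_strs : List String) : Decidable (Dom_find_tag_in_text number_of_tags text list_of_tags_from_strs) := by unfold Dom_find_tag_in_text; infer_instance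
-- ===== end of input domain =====

-- B replaces A's budget-driven find/re-slice loop by one linear character scan that
-- collects all tags, then takes the first number_of_tags of them (objective: faster
-- single pass; both mutate list_of_tags_from_strs by appending the same strings).

-- ===== PORT A =====
-- A's while loop runs exactly number_of_tags iterations when 0 ≤ number_of_tags
-- (Pre_); ported as recursion on that count.  Each iteration: find '{{', find '}}'
-- from there, conditionally append the slice, re-slice the text past the tag.
def findTagLoopA : Nat → List Char → List String → List String
  | 0, _, acc => acc
  | k + 1, t, acc =>
    let start := PySem.Chars.find t ['{', '{']
    let e := PySem.Chars.findFrom t ['}', '}'] start none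
    let acc' := if start ≠ -1 ∧ e ≠ -1 ∧ t ≠ [] then
        acc ++ [String.ofList (PySem.Chars.slice t (some (start + 2)) (some e))]
      else acc
    findTagLoopA k (PySem.Chars.slice t (some (e + 2)) none) acc'

def find_tag_in_text (number_of_tags : Int) (text : String) (list_of_tags_from_strs : List String) : List String :=
  findTagLoopA number_of_tags.toNat text.toList list_of_tags_from_strs

-- ===== PORT B =====
-- B's while loop over the characters, with buf = none (outside a tag) or
-- some buf (inside a tag, collected content); returns the list of all tags.
def scanTagsB : List Char → Option (List Char) → List String
  | [], _ => []
  | c :: rest, none =>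
      if c = '{' ∧ rest.head? = some '{' then scanTagsB rest.tail (some [])
      else scanTagsB rest none
  | c :: rest, some buf =>
      if c = '}' ∧ rest.head? = some '}' then
        String.ofList buf :: scanTagsB rest.tail none
      else scanTagsB rest (some (buf ++ [c]))
  termination_by t _ => t.length
  decreasing_by
    all_goals simp [List.length_tail]

def find_tag_in_text_alt (number_of_tags : Int) (text : String) (list_of_tags_from_strs : List String) : List String :=
  list_of_tags_from_strs ++ PySem.List.slice (scanTagsB text.toList none) none (some number_of_tags)

-- ===== PRECONDITION & SPEC =====
-- Pre_ excludes negative counts only: there A's while loop never terminates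
-- (number_of_tags is decremented past 0 and the test is '!= 0'), so A returns nothing.
def Pre_find_tag_in_text (number_of_tags : Int) (text : String) (list_of_tags_from_strs : List String) : Prop :=
  0 ≤ number_of_tags
instance (number_of_tags : Int) (text : String) (list_of_tags_from_strs : List String) : Decidable (Pre_find_tag_in_text number_of_tags text list_of_tags_from_strs) := by unfold Pre_find_tag_in_text; infer_instance

def pvWitness_find_tag_in_text : Int × String × List String := (2, "a{{b}}c{{d}}", ["x"])

def Spec_find_tag_in_text (number_of_tags : Int) (text : String) (list_of_tags_from_strs : List String) (out : List String) : Prop := out = find_tag_in_text_alt number_of_tags text list_of_tags_from_strs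
instance (number_of_tags : Int) (text : String) (list_of_tags_from_strs : List String) (out : List String) : Decidable (Spec_find_tag_in_text number_of_tags text list_of_tags_from_strs out) := by unfold Spec_find_tag_in_text; infer_instance

-- ===== CLAIM (what is proved, stated in full; the proofs are below) =====
def Claim_equal_find_tag_in_text : Prop := ∀ (number_of_tags : Int) (text : String) (list_of_tags_from_strs : List String), Dom_find_tag_in_text number_of_tags text list_of_tags_from_strs → Pre_find_tag_in_text number_of_tags text list_of_tags_from_strs → Spec_find_tag_in_text number_of_tags text list_of_tags_from_strs (find_tag_in_text number_of_tags text list_of_tags_from_strs)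

-- ===== LEMMAS AND PROOFS =====

-- a two-element list is a prefix iff the list starts with those two characters
theorem pair_prefix_iff (a b : Char) (xs : List Char) :
    [a, b] <+: xs ↔ ∃ w, xs = a :: b :: w := by
  constructor
  · rintro ⟨t, ht⟩; exact ⟨t, ht.symm⟩
  · rintro ⟨w, rfl⟩; exact ⟨w, rfl⟩

-- "no {{…}} pair in t": no '{{' at position p with a '}}' at some q ≥ p + 2
def NoTag (t : List Char) : Prop :=
  ¬ ∃ p q, p + 2 ≤ q ∧ ['{', '{'] <+: t.drop p ∧ ['}', '}'] <+: t.drop q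

theorem noTag_tail {t : List Char} (h : NoTag t) : NoTag t.tail := by
  rintro ⟨p, q, hpq, hp, hq⟩
  rw [← List.drop_one, List.drop_drop] at hp hq
  exact h ⟨1 + p, 1 + q, by omega, hp, hq⟩

-- B's scan in the inside-a-tag state returns [] when no '}}' ever occurs
theorem scanTagsB_in_no_close : ∀ (u : List Char) (buf : List Char),
    (∀ j, ¬ ['}', '}'] <+: u.drop j) → scanTagsB u (some buf) = [] := by
  intro u
  induction u with
  | nil => intro buf _; simp [scanTagsB]
  | cons c rest ih =>
    intro buf h
    have hnc : ¬ (c = '}' ∧ rest.head? = some '}') := by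
      rintro ⟨rfl, hh⟩
      rcases rest with _ | ⟨d, rest'⟩ <;> simp_all
      exact h 0 ((pair_prefix_iff _ _ _).2 ⟨rest', by simp_all⟩)
    rw [scanTagsB, if_neg hnc]
    exact ih _ (fun j => by
      have := h (j + 1)
      rwa [List.drop_succ_cons] at this)

-- B's scan returns [] when no complete tag exists
theorem scanTagsB_noTag : ∀ (t : List Char), NoTag t → scanTagsB t none = [] := by
  intro t
  induction t with
  | nil => intro _; simp [scanTagsB]
  | cons c rest ih =>
    intro h
    by_cases hc : c = '{' ∧ rest.head? = some '{'
    · rw [scanTagsB, if_pos hc]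
      obtain ⟨rfl, hh⟩ := hc
      rcases rest with _ | ⟨d, rest'⟩
      · simp at hh
      · simp at hh; subst hh
        refine scanTagsB_in_no_close _ _ (fun j hj => ?_)
        refine h ⟨0, j + 2, by omega, (pair_prefix_iff _ _ _).2 ⟨rest', rfl⟩, ?_⟩
        simpa [List.drop_succ_cons] using hj
    · rw [scanTagsB, if_neg hc]
      exact ih (by simpa [List.drop_one] using noTag_tail h)

-- B's scan in the inside state up to the first '}}' at position m
theorem scanTagsB_in_close : ∀ (m : Nat) (u buf : List Char),
    ['}', '}'] <+: u.drop m → (∀ j < m, ¬ ['}', '}'] <+: u.drop j) →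
    scanTagsB u (some buf)
      = String.ofList (buf ++ u.take m) :: scanTagsB (u.drop (m + 2)) none := by
  intro m
  induction m with
  | zero =>
    intro u buf hm _
    simp only [List.drop_zero] at hm
    obtain ⟨w, rfl⟩ := (pair_prefix_iff _ _ _).1 hm
    rw [scanTagsB, if_pos (by simp)]
    simp
  | succ m ih =>
    intro u buf hm hmin
    rcases u with _ | ⟨c, rest⟩
    · simp at hm
    have hnc : ¬ (c = '}' ∧ rest.head? = some '}') := by
      rintro ⟨rfl, hh⟩
      rcases rest with _ | ⟨d, rest'⟩ <;> simp_all
      exact hmin 0 (by omega) ((pair_prefix_iff _ _ _).2 ⟨rest', by simp_all⟩)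
    rw [scanTagsB, if_neg hnc]
    rw [List.drop_succ_cons] at hm
    rw [ih rest (buf ++ [c]) hm (fun j hj => by
      have := hmin (j + 1) (by omega)
      rwa [List.drop_succ_cons] at this)]
    simp [List.take_succ_cons, List.drop_succ_cons]

-- B's scan extracts exactly the content between the first '{{' (at s) and the
-- first '}}' at or after it (at e), then continues past the tag
theorem scanTagsB_step : ∀ (s : Nat) (e : Nat) (t : List Char),
    ['{', '{'] <+: t.drop s → (∀ i < s, ¬ ['{', '{'] <+: t.drop i) →
    ['}', '}'] <+: t.drop e → s + 2 ≤ e → (∀ j, s ≤ j → j < e → ¬ ['}', '}'] <+: t.drop j) →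
    scanTagsB t none
      = String.ofList ((t.drop (s + 2)).take (e - (s + 2))) :: scanTagsB (t.drop (e + 2)) none := by
  intro s
  induction s with
  | zero =>
    intro e t hs _ he hse hmin
    simp only [List.drop_zero] at hs
    obtain ⟨v, rfl⟩ := (pair_prefix_iff _ _ _).1 hs
    rw [scanTagsB, if_pos (by simp)]
    simp only [List.tail_cons]
    rw [scanTagsB_in_close (e - 2) v [] (by
          have : ('{' :: '{' :: v).drop e = v.drop (e - 2) := by
            rw [show e = (e - 2) + 2 by omega]; simp [List.drop_succ_cons]
          rwa [this] at he)
        (fun j hj => by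
          have := hmin (j + 2) (by omega) (by omega)
          rwa [List.drop_succ_cons, List.drop_succ_cons] at this)]
    have h1 : ('{' :: '{' :: v).drop (0 + 2) = v := by simp
    have h2 : v.drop (e - 2 + 2) = ('{' :: '{' :: v).drop (e + 2) := by
      rw [show e + 2 = (e - 2 + 2) + 2 by omega]; simp [List.drop_succ_cons]
    rw [h1, h2]
    simp
  | succ s ih =>
    intro e t hs hsmin he hse hmin
    rcases t with _ | ⟨c, rest⟩
    · simp at hs
    have hnc : ¬ (c = '{' ∧ rest.head? = some '{') := by
      rintro ⟨rfl, hh⟩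
      rcases rest with _ | ⟨d, rest'⟩ <;> simp_all
      exact hsmin 0 (by omega) ((pair_prefix_iff _ _ _).2 ⟨rest', by simp_all⟩)
    rw [scanTagsB, if_neg hnc]
    rw [List.drop_succ_cons] at hs
    have he' : ['}', '}'] <+: rest.drop (e - 1) := by
      have : (c :: rest).drop e = rest.drop (e - 1) := by
        rw [show e = (e - 1) + 1 by omega]; simp [List.drop_succ_cons]
      rwa [this] at he
    rw [ih (e - 1) rest hs
      (fun i hi => by
        have := hsmin (i + 1) (by omega); rwa [List.drop_succ_cons] at this)
      he' (by omega)
      (fun j hj1 hj2 => by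
        have := hmin (j + 1) (by omega) (by omega)
        rwa [List.drop_succ_cons] at this)]
    have e1 : rest.drop (s + 2) = (c :: rest).drop (s + 1 + 2) := by simp [List.drop_succ_cons]
    have e2 : rest.drop (e - 1 + 2) = (c :: rest).drop (e + 2) := by
      rw [show e + 2 = (e - 1 + 2) + 1 by omega]; simp [List.drop_succ_cons]
    rw [e1, e2]
    congr 3
    omega

-- findFrom with Python start -1 never finds a two-character pattern
theorem findFrom_neg_one (t sub : List Char) (hsub : 2 ≤ sub.length) :
    PySem.Chars.findFrom t sub (-1) none = -1 := by
  have hfind : ∀ (u : List Char), u.length ≤ 1 → PySem.Chars.find u sub = -1 := by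
    intro u hu
    refine (PySem.Chars.find_eq_neg_one_iff _ _).2 (fun hinf => ?_)
    have := hinf.length_le
    omega
  rw [PySem.Chars.findFrom]
  split_ifs with h1 h2 h3 h4 h5 <;>
    first
      | rfl
      | omega
      | (rw [hfind _ (by simp; omega)]; simp)

-- the main loop invariant: A's budget loop = accumulator ++ first k of B's scan
theorem loop_eq_scan : ∀ (k : Nat) (t : List Char) (acc : List String),
    findTagLoopA k t acc = acc ++ (scanTagsB t none).take k := by
  intro k
  induction k with
  | zero => intro t acc; simp [findTagLoopA]
  | succ k ih =>
    intro t acc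
    rw [findTagLoopA]
    by_cases hs : PySem.Chars.find t ['{', '{'] = -1
    · -- no '{{' at all: no append, text becomes text[1:], scan is []
      have hnin : ¬ ['{', '{'] <:+: t := (PySem.Chars.find_eq_neg_one_iff _ _).1 hs
      have hNoTag : NoTag t := by
        rintro ⟨p, q, _, hp, _⟩
        exact hnin (hp.isInfix.trans (t.drop_suffix p).isInfix)
      have he : PySem.Chars.findFrom t ['}', '}'] (PySem.Chars.find t ['{', '{']) none = -1 := by
        rw [hs]; exact findFrom_neg_one t _ (by simp)
      rw [if_neg (by rintro ⟨h1, _⟩; exact h1 hs), he]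
      have hslice : PySem.Chars.slice t (some ((-1 : Int) + 2)) none = t.drop 1 := by
        rw [show ((-1 : Int) + 2) = 1 by norm_num]
        simp [PySem.Chars.slice_eq_listSlice]
        rw [PySem.List.slice_from _ (by norm_num)]
        norm_num
      rw [hslice, ih, scanTagsB_noTag t hNoTag,
        scanTagsB_noTag _ (by simpa [List.drop_one] using noTag_tail hNoTag)]
      simp
    · have h0s : 0 ≤ PySem.Chars.find t ['{', '{'] := by
        have := PySem.Chars.neg_one_le_find t ['{', '{']
        omega
      set si := PySem.Chars.find t ['{', '{'] with hsi
      set s := si.toNat with hsn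
      have hsl : s ≤ t.length := by
        have := PySem.Chars.find_le_length t ['{', '{']
        omega
      have hcast : (s : Int) = si := Int.toNat_of_nonneg h0s
      obtain ⟨hsp, hsmin⟩ := PySem.Chars.find_spec (s := t) (sub := ['{', '{']) h0s
      rw [← hsi, ← hsn] at hsp hsmin
      by_cases he : PySem.Chars.findFrom t ['}', '}'] si none = -1
      · -- '{{' found but no '}}' after it: no append, text[1:], scan is []
        have hnin : ¬ ['}', '}'] <:+: t.drop s := by
          have := (PySem.Chars.findFrom_natCast_eq_neg_one_iff t ['}', '}'] s hsl).1
          rw [hcast] at this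
          exact this he
        have hNoTag : NoTag t := by
          rintro ⟨p, q, hpq, hp, hq⟩
          have hsle : s ≤ p := by
            by_contra hlt
            exact hsmin p (by omega) hp
          refine hnin ?_
          have : t.drop q = (t.drop s).drop (q - s) := by rw [List.drop_drop]; congr 1; omega
          rw [this] at hq
          exact hq.isInfix.trans ((t.drop s).drop_suffix (q - s)).isInfix
        rw [if_neg (by rintro ⟨_, h2, _⟩; exact h2 he), he]
        have hslice : PySem.Chars.slice t (some ((-1 : Int) + 2)) none = t.drop 1 := by
          rw [show ((-1 : Int) + 2) = 1 by norm_num]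
          simp [PySem.Chars.slice_eq_listSlice]
          rw [PySem.List.slice_from _ (by norm_num)]
          norm_num
        rw [hslice, ih, scanTagsB_noTag t hNoTag,
          scanTagsB_noTag _ (by simpa [List.drop_one] using noTag_tail hNoTag)]
        simp
      · -- a full tag: append content, continue past it
        set ei := PySem.Chars.findFrom t ['}', '}'] si none with hei
        obtain ⟨hse, hep, hemin⟩ := by
          have := PySem.Chars.findFrom_natCast_spec t ['}', '}'] s hsl
          rw [hcast] at this
          exact this he
        have h0e : 0 ≤ ei := le_trans (by omega) hse
        set e := ei.toNat with hen
        have hecast : (e : Int) = ei := Int.toNat_of_nonneg h0e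
        -- e ≥ s + 2 since '}}' cannot start on the '{{' itself
        obtain ⟨w, hw⟩ := (pair_prefix_iff _ _ _).1 hsp
        have hse2 : s + 2 ≤ e := by
          obtain ⟨w', hw'⟩ := (pair_prefix_iff _ _ _).1 hep
          by_contra hlt
          have hes : e = s ∨ e = s + 1 := by omega
          have hds1 : t.drop (s + 1) = '{' :: w := by
            have hcg := congrArg List.tail hw
            rwa [List.tail_drop] at hcg
          rcases hes with h | h
          · rw [h, hw] at hw'; simp at hw'
          · rw [h, hds1] at hw'; simp at hw'
        have htne : t ≠ [] := by
          intro h; rw [h] at hw; simp at hw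
        rw [if_pos ⟨hs, he, htne⟩]
        have hslice1 : PySem.Chars.slice t (some (si + 2)) (some ei)
            = (t.drop (s + 2)).take (e - (s + 2)) := by
          simp only [PySem.Chars.slice_eq_listSlice]
          rw [PySem.List.slice_toNat _ (by omega) h0e]
          congr 2
          · omega
          · omega
        have hslice2 : PySem.Chars.slice t (some (ei + 2)) none = t.drop (e + 2) := by
          simp only [PySem.Chars.slice_eq_listSlice]
          rw [PySem.List.slice_from _ (by omega)]
          congr 1
          omega
        rw [hslice1, hslice2, ih,
          scanTagsB_step s e t hsp hsmin hep hse2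
            (fun j hj1 hj2 => hemin j hj1 (by omega))]
        simp

-- ===== VERDICT (by name: the statement is the Claim_ definition above) =====
theorem find_tag_in_text_spec : Claim_equal_find_tag_in_text := by
  intro n text lst _ hpre
  unfold Spec_find_tag_in_text find_tag_in_text find_tag_in_text_alt
  rw [loop_eq_scan, PySem.List.slice_to _ hpre]
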